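-- pv_equiv track=rewrite | github.com/LuceneX/passphrases | src/passphrases/views/cli_view.py | _analyze_character_types
-- ===== SOURCE A (Python) =====
-- def _analyze_character_types(password: str) -> str:
--     """
--     Analyze character types in a password.
--
--     Args:
--         password: Password to analyze
--
--     Returns:
--         str: Description of character types used
--     """
--     types = []
--
--     if any(c.islower() for c in password):
--         types.append("lowercase")
--     if any(c.isupper() for c in password):
--         types.append("uppercase")
--     if any(c.isdigit() for c in password):
--         types.append("digits")
--     if any(not c.isalnum() for c in password):
--         types.append("symbols")
--
--     return ', '.join(types)
-- ===== SOURCE B (Python) =====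
-- def _analyze_character_types(password: str) -> str:
--     has_lower = has_upper = has_digit = has_symbol = False
--     for c in password:
--         if c.islower():
--             has_lower = True
--         if c.isupper():
--             has_upper = True
--         if c.isdigit():
--             has_digit = True
--         if not c.isalnum():
--             has_symbol = True
--     types = []
--     if has_lower:
--         types.append("lowercase")
--     if has_upper:
--         types.append("uppercase")
--     if has_digit:
--         types.append("digits")
--     if has_symbol:
--         types.append("symbols")
--     return ', '.join(types)
-- ===== Notes on version B (the rewrite author's own statement) =====
-- stated objective: simpler
-- what changed: Replaces the four independent any() scans over the password with a single pass that maintains four boolean flags, then emits the labels in the fixed order.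
import Mathlib
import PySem

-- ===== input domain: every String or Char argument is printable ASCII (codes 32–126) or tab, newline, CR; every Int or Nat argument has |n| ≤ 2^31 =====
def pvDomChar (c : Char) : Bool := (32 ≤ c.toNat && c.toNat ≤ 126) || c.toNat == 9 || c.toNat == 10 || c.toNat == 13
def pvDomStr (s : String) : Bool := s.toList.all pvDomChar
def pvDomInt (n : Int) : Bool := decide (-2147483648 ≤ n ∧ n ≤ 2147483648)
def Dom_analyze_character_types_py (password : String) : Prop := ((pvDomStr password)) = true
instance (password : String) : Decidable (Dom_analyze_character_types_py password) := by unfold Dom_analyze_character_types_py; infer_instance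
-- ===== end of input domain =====

-- B replaces A's four independent any() scans with one pass keeping four boolean flags (simpler: one traversal).

-- ===== PORT A =====
def analyze_character_types_py (password : String) : String :=
  let cs := password.toList
  let types : List String := []
  let types := if cs.any (fun c => PySem.Chars.islower c) then types ++ ["lowercase"] else types
  let types := if cs.any (fun c => PySem.Chars.isupper c) then types ++ ["uppercase"] else types
  let types := if cs.any (fun c => PySem.Chars.isdigit c) then types ++ ["digits"] else types
  let types := if cs.any (fun c => !PySem.Chars.isalnum c) then types ++ ["symbols"] else types
  PySem.Str.join ", " types

-- ===== PORT B =====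
-- the single-pass loop body of Source B: four flags updated per character
def pvStep (f : Bool × Bool × Bool × Bool) (c : Char) : Bool × Bool × Bool × Bool :=
  let f := if PySem.Chars.islower c then (true, f.2.1, f.2.2.1, f.2.2.2) else f
  let f := if PySem.Chars.isupper c then (f.1, true, f.2.2.1, f.2.2.2) else f
  let f := if PySem.Chars.isdigit c then (f.1, f.2.1, true, f.2.2.2) else f
  let f := if !PySem.Chars.isalnum c then (f.1, f.2.1, f.2.2.1, true) else f
  f

def analyze_character_types_py_alt (password : String) : String :=
  let f := password.toList.foldl pvStep (false, false, false, false)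
  let types : List String :=
    (if f.1 then ["lowercase"] else []) ++ (if f.2.1 then ["uppercase"] else []) ++
    (if f.2.2.1 then ["digits"] else []) ++ (if f.2.2.2 then ["symbols"] else [])
  PySem.Str.join ", " types

-- ===== PRECONDITION & SPEC =====
def Spec_analyze_character_types_py (password : String) (out : String) : Prop := out = analyze_character_types_py_alt password
instance (password : String) (out : String) : Decidable (Spec_analyze_character_types_py password out) := by unfold Spec_analyze_character_types_py; infer_instance

-- ===== CLAIM (what is proved, stated in full; the proofs are below) =====
def Claim_equal_analyze_character_types_py : Prop := ∀ (password : String), Dom_analyze_character_types_py password → Spec_analyze_character_types_py password (analyze_character_types_py password)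

-- ===== LEMMAS AND PROOFS =====
theorem pvStep_or (a b c d : Bool) (x : Char) :
    pvStep (a, b, c, d) x =
      (a || PySem.Chars.islower x, b || PySem.Chars.isupper x,
       c || PySem.Chars.isdigit x, d || !PySem.Chars.isalnum x) := by
  unfold pvStep
  cases PySem.Chars.islower x <;> cases PySem.Chars.isupper x <;>
    cases PySem.Chars.isdigit x <;> cases PySem.Chars.isalnum x <;> simp

theorem pvFold_flags (l : List Char) (a b c d : Bool) :
    l.foldl pvStep (a, b, c, d) =
      (a || l.any PySem.Chars.islower, b || l.any PySem.Chars.isupper,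
       c || l.any PySem.Chars.isdigit, d || l.any (fun x => !PySem.Chars.isalnum x)) := by
  induction l generalizing a b c d with
  | nil => simp
  | cons x xs ih =>
      simp only [List.foldl_cons, pvStep_or, ih, List.any_cons]
      simp [Bool.or_assoc]

-- ===== VERDICT (by name: the statement is the Claim_ definition above) =====
theorem analyze_character_types_py_spec : Claim_equal_analyze_character_types_py := by
  intro password _
  unfold Spec_analyze_character_types_py analyze_character_types_py analyze_character_types_py_alt
  simp only [pvFold_flags, Bool.false_or]
  split_ifs <;> rfl
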